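-- pv_equiv track=rewrite | github.com/mjtomei/project_manager | pm_core/tui/tree_layout.py | _apply_plan_grouping
-- ===== SOURCE A (Python) =====
-- def _apply_plan_grouping(
--     prs: list[dict],
--     row_assignments: dict[str, int],
-- ) -> tuple[dict[str, int], list[str]]:
--     """Insert plan-label rows and reorder when 2+ plan groups exist.
--
--     Modifies *row_assignments* in place and returns
--     ``(plan_label_rows, plan_group_order)``.
--     """
--     plan_label_rows: dict[str, int] = {}
--     plan_group_order: list[str] = []
--
--     pr_map = {pr["id"]: pr for pr in prs}
--     plan_groups: dict[str, list[str]] = {}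
--     for pr_id in row_assignments:
--         pr = pr_map.get(pr_id)
--         plan_id = (pr.get("plan") or "_standalone") if pr else "_standalone"
--         if plan_id not in plan_groups:
--             plan_groups[plan_id] = []
--         plan_groups[plan_id].append(pr_id)
--
--     if len(plan_groups) < 2:
--         return plan_label_rows, plan_group_order
--
--     # Named plans sorted by ID, standalone last
--     group_order = sorted(k for k in plan_groups if k != "_standalone")
--     if "_standalone" in plan_groups:
--         group_order.append("_standalone")
--     plan_group_order = list(group_order)
--
--     current_row = 0
--     for plan_id in group_order:
--         group_pr_ids = plan_groups[plan_id]
--         plan_label_rows[plan_id] = current_row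
--         current_row += 1  # label takes one row
--
--         group_rows = sorted(set(row_assignments[pid] for pid in group_pr_ids))
--         row_remap = {old_row: current_row + i for i, old_row in enumerate(group_rows)}
--         for pid in group_pr_ids:
--             row_assignments[pid] = row_remap[row_assignments[pid]]
--         current_row += len(group_rows) + 1  # +1 gap between groups
--
--     return plan_label_rows, plan_group_order
-- ===== SOURCE B (Python) =====
-- def _apply_plan_grouping(
--     prs: list[dict],
--     row_assignments: dict[str, int],
-- ) -> tuple[dict[str, int], list[str]]:
--     """Global-sort variant: one globally sorted list of (group rank, old row)
--     keys with closed-form offsets (position + 2*rank) replaces the per-group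
--     row-compaction loop with its running row counter."""
--     pr_map = {pr["id"]: pr for pr in prs}
--
--     def plan_of(pid):
--         pr = pr_map.get(pid)
--         return (pr.get("plan") or "_standalone") if pr else "_standalone"
--
--     plans = {plan_of(pid) for pid in row_assignments}
--     if len(plans) < 2:
--         return {}, []
--
--     order = sorted(p for p in plans if p != "_standalone")
--     if "_standalone" in plans:
--         order.append("_standalone")
--     rank = {p: g for g, p in enumerate(order)}
--
--     keyed = sorted({(rank[plan_of(pid)], row) for pid, row in row_assignments.items()})
--
--     labels = {}
--     remap = {}
--     for i, (g, row) in enumerate(keyed):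
--         if order[g] not in labels:
--             labels[order[g]] = i + 2 * g
--         remap[(g, row)] = i + 2 * g + 1
--     for pid in row_assignments:
--         row_assignments[pid] = remap[(rank[plan_of(pid)], row_assignments[pid])]
--
--     return labels, order
-- ===== Notes on version B (the rewrite author's own statement) =====
-- stated objective: alternative
-- what changed: B replaces A's per-group row-compaction loop with a running row counter by one globally sorted, deduplicated list of (group rank, old row) keys: a single enumerate pass over that list yields every label row and every new row as position + 2*rank in closed form, followed by one remap sweep over row_assignments.
import Mathlib
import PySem

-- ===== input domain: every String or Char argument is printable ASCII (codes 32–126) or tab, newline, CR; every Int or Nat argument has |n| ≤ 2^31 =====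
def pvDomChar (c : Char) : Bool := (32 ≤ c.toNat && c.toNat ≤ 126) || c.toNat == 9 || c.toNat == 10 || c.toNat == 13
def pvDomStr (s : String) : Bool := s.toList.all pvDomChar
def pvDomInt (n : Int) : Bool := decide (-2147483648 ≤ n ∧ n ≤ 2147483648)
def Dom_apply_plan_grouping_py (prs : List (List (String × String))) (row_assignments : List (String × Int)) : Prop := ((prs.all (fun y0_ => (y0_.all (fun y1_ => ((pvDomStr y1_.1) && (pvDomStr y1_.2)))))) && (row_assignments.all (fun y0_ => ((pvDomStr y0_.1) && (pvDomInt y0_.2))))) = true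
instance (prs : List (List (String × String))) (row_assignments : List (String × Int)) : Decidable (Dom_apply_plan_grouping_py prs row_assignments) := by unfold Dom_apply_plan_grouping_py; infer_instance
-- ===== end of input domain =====

-- B replaces A's per-group row-compaction loop (running row counter) by one globally sorted
-- deduplicated list of (group rank, old row) keys read off in a single enumerate pass
-- (new row = position + 2*rank); equivalence is about the RETURN value only — both Pythons
-- also mutate row_assignments in place identically, a side effect not modelled here.

-- ===== PORT A =====
-- plan_id = (pr.get("plan") or "_standalone") if pr else "_standalone"  (empty string is falsy)
def pvA_plan (pr_map : PySem.Dict String (PySem.Dict String String)) (pr_id : String) : String :=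
  match pr_map.get? pr_id with
  | none => "_standalone"
  | some pr =>
    match pr.get? "plan" with
    | none => "_standalone"
    | some s => if s = "" then "_standalone" else s

-- A's group loop; state = (plan_label_rows, current_row, row_assignments-as-dict mutated in place)
def pvA_loop (plan_groups : PySem.Dict String (List String)) :
    List String → PySem.Dict String Int × Int × PySem.Dict String Int →
      PySem.Dict String Int × Int × PySem.Dict String Int
  | [], st => st
  | plan_id :: rest, (labels, current_row, ra) =>
    let group_pr_ids := plan_groups.getD plan_id []
    let labels := labels.insert plan_id current_row
    let current_row := current_row + 1
    -- group_rows = sorted(set(row_assignments[pid] for pid in group_pr_ids)); every pid is a key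
    -- of ra (it came from ra's keys), so the getD default 0 is never read
    let group_rows := PySem.List.sorted
      (PySem.Set.ofList (group_pr_ids.map (fun pid => ra.getD pid 0))) (fun x => x) false
    let row_remap := (PySem.List.enumerate group_rows 0).foldl
      (fun d q => d.insert q.2 (current_row + q.1)) PySem.Dict.empty
    let ra := group_pr_ids.foldl (fun r pid => r.insert pid (row_remap.getD (r.getD pid 0) 0)) ra
    pvA_loop plan_groups rest (labels, current_row + (group_rows.length : Int) + 1, ra)

def apply_plan_grouping_py (prs : List (List (String × String))) (row_assignments : List (String × Int)) : (List (String × Int)) × List String :=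
  -- pr_map = {pr["id"]: pr for pr in prs}; pr["id"] raises KeyError when missing (excluded by
  -- Pre_), so the getD default "" is never read inside Pre_
  let pr_map := prs.foldl
    (fun d pr => d.insert ((PySem.Dict.ofList pr).getD "id" "") (PySem.Dict.ofList pr))
    PySem.Dict.empty
  let ra := PySem.Dict.ofList row_assignments
  -- "if plan_id not in plan_groups: plan_groups[plan_id] = []" + append = d[k] = d.get(k,[]) + [pid]
  let plan_groups := ra.keys.foldl
    (fun g pr_id => g.modify (pvA_plan pr_map pr_id) [] (fun l => l ++ [pr_id])) PySem.Dict.empty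
  if plan_groups.size < 2 then ([], [])
  else
    let group_order := PySem.List.sorted
      (plan_groups.keys.filter (fun k => k != "_standalone")) (fun x => x) false
    let group_order := if plan_groups.contains "_standalone"
      then group_order ++ ["_standalone"] else group_order
    let st := pvA_loop plan_groups group_order (PySem.Dict.empty, 0, ra)
    (st.1.items, group_order)

-- ===== PORT B =====
-- B's plan_of helper (same falsy-"" rule)
def pvB_plan (pr_map : PySem.Dict String (PySem.Dict String String)) (pr_id : String) : String :=
  match pr_map.get? pr_id with
  | none => "_standalone"
  | some pr =>
    match pr.get? "plan" with
    | none => "_standalone"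
    | some s => if s = "" then "_standalone" else s

def apply_plan_grouping_py_alt (prs : List (List (String × String))) (row_assignments : List (String × Int)) : (List (String × Int)) × List String :=
  let pr_map := prs.foldl
    (fun d pr => d.insert ((PySem.Dict.ofList pr).getD "id" "") (PySem.Dict.ofList pr))
    PySem.Dict.empty
  let ra := PySem.Dict.ofList row_assignments
  -- plans = {plan_of(pid) for pid in row_assignments}
  let plans := PySem.Set.ofList (ra.keys.map (pvB_plan pr_map))
  if plans.length < 2 then ([], [])
  else
    let order := PySem.List.sorted
      (plans.filter (fun p => p != "_standalone")) (fun x => x) false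
    let order := if plans.contains "_standalone" then order ++ ["_standalone"] else order
    -- rank = {p: g for g, p in enumerate(order)}
    let rank := (PySem.List.enumerate order 0).foldl
      (fun d q => d.insert q.2 q.1) PySem.Dict.empty
    -- keyed = sorted({(rank[plan_of(pid)], row) for ...}); plan_of(pid) is always a key of rank,
    -- so the getD default 0 is never read; tuples sort lexicographically = sorted2
    let keyed := PySem.List.sorted2
      (PySem.Set.ofList (ra.items.map (fun q => ((rank.getD (pvB_plan pr_map q.1) 0, q.2) : Int × Int))))
      (fun p => p.1) (fun p => p.2) false
    -- single pass: labels and remap from position + 2*rank; order[g] is always in range,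
    -- so the pyGetD default "" is never read
    let st := (PySem.List.enumerate keyed 0).foldl
      (fun (st : PySem.Dict String Int × PySem.Dict (Int × Int) Int) q =>
        (if st.1.contains (PySem.List.pyGetD order q.2.1 "") then st.1
         else st.1.insert (PySem.List.pyGetD order q.2.1 "") (q.1 + 2 * q.2.1),
         st.2.insert (q.2.1, q.2.2) (q.1 + 2 * q.2.1 + 1)))
      (PySem.Dict.empty, PySem.Dict.empty)
    -- the final remap sweep only mutates row_assignments (side effect, not returned)
    (st.1.items, order)

-- ===== PRECONDITION & SPEC =====
-- Pre_ excludes exactly the inputs where Python A raises KeyError: some pr in prs has no "id" key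
-- (B raises the same KeyError there).
def Pre_apply_plan_grouping_py (prs : List (List (String × String))) (_row_assignments : List (String × Int)) : Prop :=
  ∀ pr ∈ prs, (PySem.Dict.ofList pr).contains "id" = true
instance (prs : List (List (String × String))) (row_assignments : List (String × Int)) : Decidable (Pre_apply_plan_grouping_py prs row_assignments) := by unfold Pre_apply_plan_grouping_py; infer_instance
def pvWitness_apply_plan_grouping_py : (List (List (String × String))) × (List (String × Int)) :=
  ([[("id", "a"), ("plan", "p1")], [("id", "b")]], [("a", 0), ("b", 1)])

def Spec_apply_plan_grouping_py (prs : List (List (String × String))) (row_assignments : List (String × Int)) (out : (List (String × Int)) × List String) : Prop := out = apply_plan_grouping_py_alt prs row_assignments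
instance (prs : List (List (String × String))) (row_assignments : List (String × Int)) (out : (List (String × Int)) × List String) : Decidable (Spec_apply_plan_grouping_py prs row_assignments out) := by unfold Spec_apply_plan_grouping_py; infer_instance

-- ===== CLAIM =====
def Claim_equal_apply_plan_grouping_py : Prop := ∀ (prs : List (List (String × String))) (row_assignments : List (String × Int)), Dom_apply_plan_grouping_py prs row_assignments → Pre_apply_plan_grouping_py prs row_assignments → Spec_apply_plan_grouping_py prs row_assignments (apply_plan_grouping_py prs row_assignments)

-- ===== LEMMAS AND PROOFS =====

theorem pvB_plan_eq : pvB_plan = pvA_plan := rfl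

-- canonical per-plan distinct-rows layout that BOTH ports are reduced to:
-- pvAux R walks the group order inserting (plan ↦ base), advancing base by |set(R p)| + 2
def pvAux (R : String → List Int) : List String → PySem.Dict String Int × Int →
    PySem.Dict String Int × Int
  | [], st => st
  | p :: rest, (L, base) =>
    pvAux R rest (L.insert p base, base + ((PySem.Set.ofList (R p)).length : Int) + 2)

-- the flattened global key list: per group g, the sorted distinct rows tagged with g
def pvBfl (R : String → List Int) : List String → Int → List (Int × Int)
  | [], _ => []
  | p :: rest, g =>
    (PySem.List.sorted (PySem.Set.ofList (R p)) (fun x => x) false).map (fun r => (g, r))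
      ++ pvBfl R rest (g + 1)

-- B's labels-only step (the remap component is split off by foldl_prod_mk)
def pvStepL (O : List String) (L : PySem.Dict String Int) (q : Int × (Int × Int)) :
    PySem.Dict String Int :=
  if L.contains (PySem.List.pyGetD O q.2.1 "") then L
  else L.insert (PySem.List.pyGetD O q.2.1 "") (q.1 + 2 * q.2.1)

-- getD after a key-grouping modify-fold = fold of the step over the matching inputs
theorem pv_getD_foldl_modify {κ ν β : Type} [BEq κ] [LawfulBEq κ] [DecidableEq κ]
    (l : List β) (key : β → κ) (d0 : ν) (step : ν → β → ν) (d : PySem.Dict κ ν) (c : κ) :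
    (l.foldl (fun d x => d.modify (key x) d0 (fun v => step v x)) d).getD c d0
      = (l.filter (fun x => key x == c)).foldl step (d.getD c d0) := by
  induction l generalizing d with
  | nil => rfl
  | cons x xs ih =>
    simp only [List.foldl_cons, List.filter_cons]
    by_cases h : key x = c
    · subst h; simp [ih]
    · have hb : (key x == c) = false := by simp [h]
      rw [hb]
      simp only [Bool.false_eq_true, if_false, ih]
      rw [PySem.Dict.getD_modify]
      simp [Ne.symm h]

-- a foldl of inserts at keys of l does not change getD at a key outside l
theorem pv_getD_foldl_insert_not_mem {κ ν : Type} [BEq κ] [LawfulBEq κ] [DecidableEq κ]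
    (l : List κ) (v : PySem.Dict κ ν → κ → ν) (d : PySem.Dict κ ν) (c : κ) (d0 : ν)
    (h : c ∉ l) :
    (l.foldl (fun r k => r.insert k (v r k)) d).getD c d0 = d.getD c d0 := by
  induction l generalizing d with
  | nil => rfl
  | cons x xs ih =>
    simp only [List.foldl_cons]
    rw [ih _ (fun hm => h (List.mem_cons_of_mem _ hm)), PySem.Dict.getD_insert]
    have : c ≠ x := fun he => h (he ▸ List.mem_cons_self)
    simp [this]

-- the rank fold does not change getD at a plan not in l
theorem pv_rank_not_mem (l : List String) (s : Int) (d : PySem.Dict String Int) (p : String)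
    (h : p ∉ l) :
    ((PySem.List.enumerate l s).foldl (fun d q => d.insert q.2 q.1) d).getD p 0
      = d.getD p 0 := by
  induction l generalizing s d with
  | nil => rfl
  | cons x xs ih =>
    rw [PySem.List.enumerate_cons]
    simp only [List.foldl_cons]
    rw [ih _ _ (fun hm => h (List.mem_cons_of_mem _ hm)), PySem.Dict.getD_insert]
    have : p ≠ x := fun he => h (he ▸ List.mem_cons_self)
    simp [this]

-- rank[l[j]] = s + j for a nodup l
theorem pv_rank_getD (l : List String) (s : Int) (d : PySem.Dict String Int) (j : Nat)
    (hnd : l.Nodup) (hj : j < l.length) :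
    ((PySem.List.enumerate l s).foldl (fun d q => d.insert q.2 q.1) d).getD (l[j]) 0
      = s + j := by
  induction l generalizing s d j with
  | nil => simp at hj
  | cons x xs ih =>
    rw [PySem.List.enumerate_cons]
    simp only [List.foldl_cons]
    cases j with
    | zero =>
      have hx : x ∉ xs := (List.nodup_cons.mp hnd).1
      simp only [List.getElem_cons_zero]
      rw [pv_rank_not_mem _ _ _ _ hx, PySem.Dict.getD_insert]
      simp
    | succ n =>
      simp only [List.getElem_cons_succ]
      rw [ih _ _ _ (List.nodup_cons.mp hnd).2 (by simpa using hj)]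
      push_cast; ring

-- Python compares tuples lexicographically: sorted2 on pairs = sorted with the lex key
theorem pv_sorted2_eq_sorted_lex (xs : List (Int × Int)) :
    PySem.List.sorted2 xs (fun p => p.1) (fun p => p.2) false
      = PySem.List.sorted xs (fun p => (toLex p : Int ×ₗ Int)) false := by
  simp only [PySem.List.sorted2, PySem.List.sorted, Bool.false_eq_true, if_false]
  congr 1
  funext acc x
  congr 1
  funext a b
  rcases a with ⟨a1, a2⟩; rcases b with ⟨b1, b2⟩
  by_cases h1 : a1 < b1 <;> by_cases h2 : b1 < a1 <;> by_cases h3 : a2 < b2 <;>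
    simp [Prod.Lex.lt_iff, h1, h2, h3] <;> omega

-- membership in the flattened key list
theorem pv_mem_bfl (R : String → List Int) (l : List String) (g : Int) (x : Int × Int) :
    x ∈ pvBfl R l g ↔ ∃ j : Nat, ∃ hj : j < l.length,
      x.1 = g + j ∧ x.2 ∈ PySem.Set.ofList (R l[j]) := by
  induction l generalizing g with
  | nil => simp [pvBfl]
  | cons p rest ih =>
    simp only [pvBfl, List.mem_append, List.mem_map, ih]
    constructor
    · rintro (⟨r, hr, rfl⟩ | ⟨j, hj, h1, h2⟩)
      · exact ⟨0, by simp, by simp, by simpa [PySem.List.mem_sorted] using hr⟩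
      · exact ⟨j + 1, by simpa using hj, by simp [h1]; ring, by simpa using h2⟩
    · rintro ⟨j, hj, h1, h2⟩
      cases j with
      | zero =>
        rcases x with ⟨x1, x2⟩
        left
        exact ⟨x2, by simpa [PySem.List.mem_sorted] using h2, by simp at h1; simp [h1]⟩
      | succ n =>
        right
        exact ⟨n, by simpa using hj, by simp [h1]; ring, by simpa using h2⟩

-- first components in pvBfl R l g are ≥ g
theorem pv_fst_bfl_ge (R : String → List Int) (l : List String) (g : Int) (x : Int × Int)
    (hx : x ∈ pvBfl R l g) : g ≤ x.1 := by
  rcases (pv_mem_bfl R l g x).mp hx with ⟨j, hj, h1, _⟩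
  omega

-- the flattened list is strictly increasing in the lexicographic order
theorem pv_pairwise_bfl (R : String → List Int) (l : List String) (g : Int) :
    (pvBfl R l g).Pairwise (fun a b => (toLex a : Int ×ₗ Int) < toLex b) := by
  induction l generalizing g with
  | nil => simp [pvBfl]
  | cons p rest ih =>
    simp only [pvBfl]
    rw [List.pairwise_append]
    refine ⟨?_, ih (g + 1), ?_⟩
    · have hs : (PySem.List.sorted (PySem.Set.ofList (R p)) (fun x => x) false).Pairwise
          (· < ·) := PySem.List.sorted_ofList_pairwise_lt (R p)
      refine (List.pairwise_map.mpr (hs.imp ?_))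
      intro a b hab
      simp [Prod.Lex.lt_iff, hab]
    · rintro x hx y hy
      rcases List.mem_map.mp hx with ⟨r, _, rfl⟩
      have := pv_fst_bfl_ge R rest (g + 1) y hy
      simp only [Prod.Lex.lt_iff]
      left; simp; omega

-- processing a block whose plan is already labelled leaves the labels unchanged
theorem pv_skip_block (O : List String) (gI : Int) (rs : List Int) (s : Int)
    (L : PySem.Dict String Int) (hc : L.contains (PySem.List.pyGetD O gI "") = true) :
    (PySem.List.enumerate (rs.map (fun r => ((gI, r) : Int × Int))) s).foldl (pvStepL O) L
      = L := by
  induction rs generalizing s with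
  | nil => rfl
  | cons r rest ih =>
    simp only [List.map_cons, PySem.List.enumerate_cons, List.foldl_cons]
    rw [pvStepL]
    simp only [hc, if_true]
    exact ih (s + 1)

-- the single enumerate pass over the flattened key list is exactly the pvAux walk
theorem pv_pass (R : String → List Int) (O : List String) :
    ∀ (suf pre : List String) (s : Int) (L : PySem.Dict String Int),
      O = pre ++ suf → O.Nodup →
      (∀ p ∈ suf, L.contains p = false) →
      (∀ p ∈ suf, PySem.Set.ofList (R p) ≠ []) →
      (PySem.List.enumerate (pvBfl R suf (pre.length : Int)) s).foldl (pvStepL O) L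
        = (pvAux R suf (L, s + 2 * (pre.length : Int))).1 := by
  intro suf
  induction suf with
  | nil => intro pre s L _ _ _ _; rfl
  | cons p rest ih =>
    intro pre s L hO hnd hfresh hne
    have hblock : PySem.List.sorted (PySem.Set.ofList (R p)) (fun x => x) false ≠ [] := by
      rw [Ne, PySem.List.sorted_eq_nil_iff]
      exact hne p List.mem_cons_self
    obtain ⟨r0, rs, hbr⟩ : ∃ r0 rs,
        PySem.List.sorted (PySem.Set.ofList (R p)) (fun x => x) false = r0 :: rs := by
      cases h : PySem.List.sorted (PySem.Set.ofList (R p)) (fun x => x) false with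
      | nil => exact absurd h hblock
      | cons a b => exact ⟨a, b, rfl⟩
    have hget : PySem.List.pyGetD O (pre.length : Int) "" = p := by
      subst hO
      rw [PySem.List.pyGetD_natCast]
      simp [List.getD]
    simp only [pvBfl, hbr, PySem.List.enumerate_append, List.foldl_append,
      List.map_cons, PySem.List.enumerate_cons, List.foldl_cons]
    rw [pvStepL]
    simp only [hget, hfresh p List.mem_cons_self, Bool.false_eq_true, if_false]
    rw [pv_skip_block O ((pre.length : Nat) : Int) rs (s + 1)
      (L.insert p (s + 2 * (pre.length : Int))) (by rw [hget]; simp)]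
    have hlen : (PySem.Set.ofList (R p)).length = rs.length + 1 := by
      rw [← PySem.List.length_sorted (PySem.Set.ofList (R p)) (fun x => x) false, hbr]
      simp
    have hstep := ih (pre ++ [p]) (s + ((rs.length : Int) + 1))
      (L.insert p (s + 2 * (pre.length : Int)))
      (by rw [hO, List.append_assoc]; rfl) hnd
      ?_ (fun q hq => hne q (List.mem_cons_of_mem _ hq))
    · simp only [pvAux, hlen]
      simp only [List.length_append, List.length_cons, List.length_nil] at hstep
      convert hstep using 3 <;> (try simp only [List.length_cons, List.length_map]) <;> push_cast <;> ring_nf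
    · intro q hq
      have hqp : q ≠ p := by
        have : (p :: rest).Nodup := by
          rw [hO] at hnd; exact hnd.of_append_right
        exact fun he => (List.nodup_cons.mp this).1 (he ▸ hq)
      rw [PySem.Dict.contains_insert]
      simp [hqp, hfresh q (List.mem_cons_of_mem _ hq)]

-- A's group loop labels = the pvAux walk (A reads from the dict it mutates; later groups'
-- reads are untouched because the groups partition the keys)
theorem pv_loop_eq (pg : PySem.Dict String (List String)) (f : String → String)
    (ks : List String) (D : PySem.Dict String Int)
    (hg : ∀ p, pg.getD p [] = ks.filter (fun k => f k == p)) :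
    ∀ (order : List String) (labels : PySem.Dict String Int) (cur : Int)
      (ra : PySem.Dict String Int), order.Nodup →
      (∀ k ∈ ks, f k ∈ order → ra.getD k 0 = D.getD k 0) →
      (pvA_loop pg order (labels, cur, ra)).1
        = (pvAux (fun p => (ks.filter (fun k => f k == p)).map (fun k => D.getD k 0))
            order (labels, cur)).1 := by
  intro order
  induction order with
  | nil => intro labels cur ra _ _; rfl
  | cons p rest ih =>
    intro labels cur ra hnd hagree
    have hpnotin : p ∉ rest := (List.nodup_cons.mp hnd).1
    have hreads : (pg.getD p []).map (fun pid => ra.getD pid 0)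
        = (ks.filter (fun k => f k == p)).map (fun k => D.getD k 0) := by
      rw [hg]
      apply List.map_congr_left
      intro k hk
      have hk' := List.mem_filter.mp hk
      exact hagree k hk'.1 (by simp [eq_of_beq hk'.2])
    simp only [pvA_loop, pvAux, hreads, PySem.List.length_sorted]
    have harith : cur + 1 + ((PySem.Set.ofList ((ks.filter (fun k => f k == p)).map
        (fun k => D.getD k 0))).length : Int) + 1
        = cur + ((PySem.Set.ofList ((ks.filter (fun k => f k == p)).map
        (fun k => D.getD k 0))).length : Int) + 2 := by ring
    rw [harith]
    refine ih _ _ _ ((List.nodup_cons.mp hnd).2) ?_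
    intro k hk hfk
    have hne : f k ≠ p := fun he => hpnotin (he ▸ hfk)
    have hnotg : k ∉ pg.getD p [] := by
      rw [hg]
      intro hm
      exact hne (eq_of_beq (List.mem_filter.mp hm).2)
    rw [pv_getD_foldl_insert_not_mem _ _ _ _ _ hnotg]
    exact hagree k hk (List.mem_cons_of_mem _ hfk)

-- the two ports agree on every input
theorem pv_main (prs : List (List (String × String))) (ra : List (String × Int)) :
    apply_plan_grouping_py prs ra = apply_plan_grouping_py_alt prs ra := by
  unfold apply_plan_grouping_py apply_plan_grouping_py_alt
  simp only [pvB_plan_eq]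
  set M := prs.foldl
    (fun d pr => d.insert ((PySem.Dict.ofList pr).getD "id" "") (PySem.Dict.ofList pr))
    PySem.Dict.empty with hM
  set D := PySem.Dict.ofList ra with hD
  set f := pvA_plan M with hf
  set ks := D.keys with hks
  set pg := ks.foldl (fun g pr_id => g.modify (f pr_id) [] (fun l => l ++ [pr_id]))
    PySem.Dict.empty with hpg
  set plans := PySem.Set.ofList (ks.map f) with hplans
  have hnd : ks.Nodup := PySem.Dict.nodup_keys_ofList ra
  have hitems : D.items = ks.map (fun k => (k, D.getD k 0)) :=
    PySem.Dict.items_eq_map_keys D hnd 0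
  have hkeys_pg : pg.keys = plans := by
    rw [hpg, PySem.Dict.keys_foldl_modify_key ks f [] (fun _ x => fun l => l ++ [x])
      PySem.Dict.empty]
    simp [PySem.Set.update_nil_left, hplans]
  have hsz : pg.size = plans.length := by
    rw [← hkeys_pg]; simp [PySem.Dict.size, PySem.Dict.keys]
  have hndp : plans.Nodup := PySem.Set.nodup_ofList _
  have hcont : pg.contains "_standalone" = PySem.Set.contains plans "_standalone" := by
    rw [PySem.Dict.contains_eq_decide_mem_keys, hkeys_pg]
    by_cases hm : "_standalone" ∈ plans <;> simp [hm]
  have hg : ∀ p, pg.getD p [] = ks.filter (fun k => f k == p) := by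
    intro p
    rw [hpg, pv_getD_foldl_modify ks f [] (fun v x => v ++ [x]) PySem.Dict.empty p,
      PySem.List.foldl_append_singleton]
    simp
  rw [hsz]
  by_cases hlt : plans.length < 2
  · simp [hlt]
  · simp only [hlt, if_false]
    rw [hkeys_pg, hcont]
    set rows := fun p => (ks.filter (fun k => f k == p)).map (fun k => D.getD k 0) with hrows
    set GF := PySem.List.sorted (plans.filter (fun k => k != "_standalone")) (fun x => x) false
      with hGF
    have hGFnd : GF.Nodup := (PySem.List.sorted_perm _ _ _).nodup_iff.mpr (hndp.filter _)
    set O := if PySem.Set.contains plans "_standalone" then GF ++ ["_standalone"] else GF with hO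
    have hOnd : O.Nodup := by
      rw [hO]; split
      · refine List.nodup_append.mpr ⟨hGFnd, by simp, ?_⟩
        intro x hx
        have := List.mem_filter.mp ((PySem.List.mem_sorted _ _ _ _).mp hx)
        simp_all
      · exact hGFnd
    have hOsup : ∀ p ∈ plans, p ∈ O := by
      intro p hp
      by_cases hps : p = "_standalone"
      · subst hps
        have hc : PySem.Set.contains plans "_standalone" = true :=
          (PySem.Set.contains_iff _ _).mpr hp
        rw [hO, if_pos hc]
        simp
      · have hpf : p ∈ GF := (PySem.List.mem_sorted _ _ _ _).mpr
          (List.mem_filter.mpr ⟨hp, by simp [hps]⟩)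
        rw [hO]; split <;> simp [hpf]
    have hOsub : ∀ p ∈ O, p ∈ plans := by
      intro p hp
      rw [hO] at hp
      rcases (by split at hp <;> simp_all :
          p ∈ GF ∨ (p = "_standalone" ∧ PySem.Set.contains plans "_standalone" = true)) with
        h | ⟨h1, h2⟩
      · exact (List.mem_filter.mp ((PySem.List.mem_sorted _ _ _ _).mp h)).1
      · exact h1 ▸ (PySem.Set.contains_iff _ _).mp h2
    have hfk : ∀ k ∈ ks, f k ∈ O := fun k hk =>
      hOsup _ ((PySem.Set.mem_ofList _ _).mpr (List.mem_map_of_mem hk))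
    set Rk := (PySem.List.enumerate O 0).foldl (fun d q => d.insert q.2 q.1) PySem.Dict.empty
      with hRk
    have hrank : ∀ k ∈ ks, Rk.getD (f k) 0 = ((O.idxOf (f k) : Nat) : Int) := by
      intro k hk
      have hmem := hfk k hk
      have hj : O.idxOf (f k) < O.length := List.idxOf_lt_length_of_mem hmem
      have h := pv_rank_getD O 0 PySem.Dict.empty (O.idxOf (f k)) hOnd hj
      rw [List.getElem_idxOf] at h
      simpa using h
    -- the deduplicated key set is a permutation of the flattened per-group list
    have hkeyed : PySem.List.sorted2
        (PySem.Set.ofList (D.items.map (fun q => ((Rk.getD (f q.1) 0, q.2) : Int × Int))))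
        (fun p => p.1) (fun p => p.2) false = pvBfl rows O 0 := by
      rw [pv_sorted2_eq_sorted_lex]
      refine PySem.List.sorted_eq_of_perm_of_pairwise_lt _ _ (fun p => (toLex p : Int ×ₗ Int))
        ?_ (pv_pairwise_bfl rows O 0)
      have hbflnd : (pvBfl rows O 0).Nodup :=
        (pv_pairwise_bfl rows O 0).imp
          (fun hlt => by intro he; subst he; exact absurd hlt (lt_irrefl _))
      refine (List.perm_ext_iff_of_nodup hbflnd (PySem.Set.nodup_ofList _)).mpr ?_
      intro x
      rw [pv_mem_bfl, PySem.Set.mem_ofList, hitems, List.map_map]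
      constructor
      · rintro ⟨j, hj, hx1, hx2⟩
        rw [hrows] at hx2
        obtain ⟨k, hkf, hkv⟩ :
            ∃ k, (k ∈ List.filter (fun k => f k == O[j]) ks) ∧ D.getD k 0 = x.2 :=
          List.mem_map.mp ((PySem.Set.mem_ofList _ _).mp hx2)
        rcases List.mem_filter.mp hkf with ⟨hk, hbeq⟩
        have hfkj : f k = O[j] := by simpa using hbeq
        have hidx : O.idxOf (f k) = j := by rw [hfkj]; exact hOnd.idxOf_getElem j hj
        refine List.mem_map.mpr ⟨k, hk, ?_⟩
        simp only [Function.comp]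
        rw [hrank k hk, hidx]
        rcases x with ⟨x1, x2⟩
        simp at hx1 hkv
        simp [hx1, hkv]
      · intro hx
        rcases List.mem_map.mp hx with ⟨k, hk, hkv⟩
        simp only [Function.comp] at hkv
        refine ⟨O.idxOf (f k), List.idxOf_lt_length_of_mem (hfk k hk), ?_, ?_⟩
        · rw [← hkv]
          simp [hrank k hk]
        · rw [hrows]
          refine (PySem.Set.mem_ofList _ _).mpr (List.mem_map.mpr ⟨k, List.mem_filter.mpr
            ⟨hk, by simp [List.getElem_idxOf]⟩, ?_⟩)
          rw [← hkv]
    -- split the two independent dict accumulators of B's single pass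
    rw [PySem.List.foldl_prod_mk
      (f := fun (L : PySem.Dict String Int) (q : Int × (Int × Int)) =>
        if L.contains (PySem.List.pyGetD O q.2.1 "") then L
        else L.insert (PySem.List.pyGetD O q.2.1 "") (q.1 + 2 * q.2.1))
      (g := fun (Lr : PySem.Dict (Int × Int) Int) (q : Int × (Int × Int)) =>
        Lr.insert (q.2.1, q.2.2) (q.1 + 2 * q.2.1 + 1))]
    have hstepL : (fun (L : PySem.Dict String Int) (q : Int × (Int × Int)) =>
        if L.contains (PySem.List.pyGetD O q.2.1 "") then L
        else L.insert (PySem.List.pyGetD O q.2.1 "") (q.1 + 2 * q.2.1)) = pvStepL O := rfl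
    rw [hkeyed, hstepL]
    have hne : ∀ p ∈ O, PySem.Set.ofList (rows p) ≠ [] := by
      intro p hp
      rcases List.mem_map.mp ((PySem.Set.mem_ofList _ _).mp (hOsub p hp)) with ⟨k, hk, hfkp⟩
      have : D.getD k 0 ∈ rows p := by
        rw [hrows]
        exact List.mem_map.mpr ⟨k, List.mem_filter.mpr ⟨hk, by simp [hfkp]⟩, rfl⟩
      exact List.ne_nil_of_mem ((PySem.Set.mem_ofList _ _).mpr this)
    have hpass := pv_pass rows O O [] 0 PySem.Dict.empty rfl hOnd (by simp) hne
    simp only [List.length_nil, Nat.cast_zero, mul_zero, add_zero] at hpass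
    rw [hpass]
    have hloop := pv_loop_eq pg f ks D hg O PySem.Dict.empty 0 D hOnd (fun _ _ _ => rfl)
    rw [hloop]

-- ===== VERDICT =====
theorem apply_plan_grouping_py_spec : Claim_equal_apply_plan_grouping_py := by
  intro prs ra _ _
  unfold Spec_apply_plan_grouping_py
  exact pv_main prs ra
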